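-- pv_equiv track=rewrite | github.com/swordinhand/learn_python | checkio/oreilly/create_intervals.py | create_intervals_2
-- ===== SOURCE A (Python) =====
-- def create_intervals_2(data):
--     """
--         Create a list of intervals out of set of ints.
--     """
--     # your code here
--     if len(data) == 0:
--         return []
--     lst = sorted(list(data))
--     result = []
--     begin=end=lst[0]
--     for i in range(1, len(lst)):
--         if lst[i] == lst[i-1] + 1:
--             end = lst[i]
--         else:
--             result.append((begin, end))
--             begin=end=lst[i]
--     result.append((begin, end))
--     return result
-- ===== SOURCE B (Python) =====
-- def create_intervals_2(data):
--     """
--         Create a list of intervals out of set of ints.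
--     """
--     # Boundary-index decomposition: find where runs start, then pair start/end indices.
--     lst = sorted(data)
--     n = len(lst)
--     starts = [i for i in range(n) if i == 0 or lst[i] != lst[i - 1] + 1]
--     return [(lst[s], lst[t - 1]) for s, t in zip(starts, starts[1:] + [n])]
-- ===== Notes on version B (the rewrite author's own statement) =====
-- stated objective: alternative
-- what changed: Replaced A's begin/end state machine with a two-phase decomposition: collect the run-boundary indices with a comprehension, then pair each start with the next start to emit (first, last) of every run; the empty-input guard disappears.
import Mathlib
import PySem

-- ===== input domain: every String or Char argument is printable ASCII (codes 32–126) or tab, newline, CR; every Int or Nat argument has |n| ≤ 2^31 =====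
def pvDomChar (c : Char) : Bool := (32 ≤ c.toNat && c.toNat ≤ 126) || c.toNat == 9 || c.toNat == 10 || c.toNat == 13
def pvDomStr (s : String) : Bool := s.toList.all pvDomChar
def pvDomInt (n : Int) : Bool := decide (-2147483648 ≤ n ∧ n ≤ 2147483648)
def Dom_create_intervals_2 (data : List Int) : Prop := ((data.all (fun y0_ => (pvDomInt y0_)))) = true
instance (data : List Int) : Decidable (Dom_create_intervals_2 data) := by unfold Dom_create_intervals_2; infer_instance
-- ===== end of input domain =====

-- B replaces A's begin/end state machine by boundary-index collection plus start/next-start pairing (alternative decomposition, same cost).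

-- ===== PORT A =====
-- all pyGetD indices are in range (1 ≤ i < len lst and i = 0 on a nonempty list), so the default 0 is never used
def create_intervals_2 (data : List Int) : List (Int × Int) :=
  if PySem.List.len data == 0 then []
  else
    let lst := PySem.List.sorted data id false
    let st := (PySem.List.pyRange 1 (PySem.List.len lst) 1).foldl
      (fun (st : List (Int × Int) × Int × Int) i =>
        if PySem.List.pyGetD lst i 0 == PySem.List.pyGetD lst (i-1) 0 + 1 then
          (st.1, st.2.1, PySem.List.pyGetD lst i 0)
        else
          (st.1 ++ [(st.2.1, st.2.2)], PySem.List.pyGetD lst i 0, PySem.List.pyGetD lst i 0))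
      ([], PySem.List.pyGetD lst 0 0, PySem.List.pyGetD lst 0 0)
    st.1 ++ [(st.2.1, st.2.2)]

-- ===== PORT B =====
-- all pyGetD indices are in range (starts ⊆ [0, n), and t - 1 ∈ [0, n)), so the default 0 is never used
def create_intervals_2_alt (data : List Int) : List (Int × Int) :=
  let lst := PySem.List.sorted data id false
  let n := PySem.List.len lst
  let starts := (PySem.List.pyRange 0 n 1).filter
    (fun i => i == 0 || !(PySem.List.pyGetD lst i 0 == PySem.List.pyGetD lst (i-1) 0 + 1))
  (starts.zip (starts.drop 1 ++ [n])).map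
    (fun st => (PySem.List.pyGetD lst st.1 0, PySem.List.pyGetD lst (st.2 - 1) 0))

-- ===== PRECONDITION & SPEC =====
def Spec_create_intervals_2 (data : List Int) (out : List (Int × Int)) : Prop := out = create_intervals_2_alt data
instance (data : List Int) (out : List (Int × Int)) : Decidable (Spec_create_intervals_2 data out) := by unfold Spec_create_intervals_2; infer_instance

-- ===== CLAIM (what is proved, stated in full; the proofs are below) =====
def Claim_equal_create_intervals_2 : Prop := ∀ (data : List Int), Dom_create_intervals_2 data → Spec_create_intervals_2 data (create_intervals_2 data)

-- ===== LEMMAS AND PROOFS =====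

-- the common run structure both programs compute: maximal runs of consecutive integers as (begin, end) pairs
def pvRun (b e : Int) : List Int → List (Int × Int)
  | [] => [(b, e)]
  | c :: cs => if c = e + 1 then pvRun b c cs else (b, e) :: pvRun c c cs

-- B's zip of the start list with its own tail, as a structural recursion
def pvChain (g : Int × Int → Int × Int) (z : Int) : List Int → List (Int × Int)
  | [] => []
  | s :: rest => match rest with
    | [] => [g (s, z)]
    | s' :: r => g (s, s') :: pvChain g z (s' :: r)

-- A's trailing 'result.append((begin, end))'
def pvFin (st : List (Int × Int) × Int × Int) : List (Int × Int) := st.1 ++ [(st.2.1, st.2.2)]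

theorem pvChain_zip (g : Int × Int → Int × Int) (z : Int) (S : List Int) :
    (S.zip (S.drop 1 ++ [z])).map g = pvChain g z S := by
  induction S with
  | nil => simp [pvChain]
  | cons s rest ih =>
    cases rest with
    | nil => simp [pvChain]
    | cons s' r => simpa [pvChain] using ih

theorem pvCast1 (k : Nat) : ((k : Int) + 1) = ((k + 1 : Nat) : Int) := by push_cast; ring

theorem pvGetD_cast (lst : List Int) (k : Nat) :
    PySem.List.pyGetD lst ((k : Int) + 1 - 1) 0 = lst.getD k 0 := by
  have h : ((k : Int) + 1 - 1) = ((k : Nat) : Int) := by ring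
  rw [h, PySem.List.pyGetD_natCast]

theorem pvDropCons (lst : List Int) (k : Nat) (h : k + 1 < lst.length) :
    lst.drop (k + 1) = lst.getD (k + 1) 0 :: lst.drop (k + 2) := by
  rw [List.getD_eq_getElem lst 0 h]
  exact List.drop_eq_getElem_cons h

theorem pvRun_cons_pos (b e c : Int) (cs : List Int) (hc : c = e + 1) :
    pvRun b e (c :: cs) = pvRun b c cs := by
  simp only [pvRun]; rw [if_pos hc]

theorem pvRun_cons_neg (b e c : Int) (cs : List Int) (hc : ¬ c = e + 1) :
    pvRun b e (c :: cs) = (b, e) :: pvRun c c cs := by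
  simp only [pvRun]; rw [if_neg hc]

theorem pvAfold (lst : List Int) (m : Nat) : ∀ (k : Nat) (b e : Int) (res : List (Int × Int)),
    m + (k + 1) = lst.length → lst.getD k 0 = e →
    pvFin ((PySem.List.pyRange ((k : Int) + 1) (PySem.List.len lst) 1).foldl
      (fun (st : List (Int × Int) × Int × Int) i =>
        if PySem.List.pyGetD lst i 0 == PySem.List.pyGetD lst (i-1) 0 + 1 then
          (st.1, st.2.1, PySem.List.pyGetD lst i 0)
        else
          (st.1 ++ [(st.2.1, st.2.2)], PySem.List.pyGetD lst i 0, PySem.List.pyGetD lst i 0))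
      (res, b, e)) = res ++ pvRun b e (lst.drop (k + 1)) := by
  induction m with
  | zero =>
    intro k b e res h he
    rw [PySem.List.pyRange_one_eq_nil (by simp; omega)]
    have hd : lst.drop (k + 1) = [] := List.drop_eq_nil_of_le (by omega)
    simp [pvFin, pvRun, hd]
  | succ m ih =>
    intro k b e res h he
    have hk1 : k + 1 < lst.length := by omega
    rw [PySem.List.pyRange_one_cons (by simp; omega)]
    simp only [List.foldl_cons]
    rw [show PySem.List.pyGetD lst ((k : Int) + 1) 0 = lst.getD (k + 1) 0 by
          rw [pvCast1, PySem.List.pyGetD_natCast]]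
    rw [pvGetD_cast, he, pvDropCons lst k hk1]
    by_cases hc : lst.getD (k + 1) 0 = e + 1
    · rw [if_pos (beq_iff_eq.mpr hc)]
      rw [show ((k : Int) + 1 + 1) = ((k + 1 : Nat) : Int) + 1 by push_cast; ring]
      rw [ih (k + 1) b (lst.getD (k + 1) 0) res (by omega) rfl]
      rw [pvRun_cons_pos b e _ _ hc]
    · rw [if_neg (by simpa using hc)]
      rw [show ((k : Int) + 1 + 1) = ((k + 1 : Nat) : Int) + 1 by push_cast; ring]
      rw [ih (k + 1) (lst.getD (k + 1) 0) (lst.getD (k + 1) 0) (res ++ [(b, e)]) (by omega) rfl]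
      rw [pvRun_cons_neg b e _ _ hc, List.append_assoc]
      rfl

theorem pvBfold (lst : List Int) (m : Nat) : ∀ (k s : Nat),
    m + (k + 1) = lst.length →
    pvChain (fun st => (PySem.List.pyGetD lst st.1 0, PySem.List.pyGetD lst (st.2 - 1) 0))
        (PySem.List.len lst)
        ((s : Int) :: (PySem.List.pyRange ((k : Int) + 1) (PySem.List.len lst) 1).filter
          (fun i => i == 0 || !(PySem.List.pyGetD lst i 0 == PySem.List.pyGetD lst (i-1) 0 + 1)))
      = pvRun (lst.getD s 0) (lst.getD k 0) (lst.drop (k + 1)) := by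
  induction m with
  | zero =>
    intro k s h
    rw [PySem.List.pyRange_one_eq_nil (by simp; omega)]
    have hd : lst.drop (k + 1) = [] := List.drop_eq_nil_of_le (by omega)
    rw [hd]
    simp only [pvChain, List.filter_nil, pvRun]
    rw [PySem.List.pyGetD_natCast]
    rw [show PySem.List.len lst - 1 = ((k : Nat) : Int) by simp; omega]
    rw [PySem.List.pyGetD_natCast]
  | succ m ih =>
    intro k s h
    have hk1 : k + 1 < lst.length := by omega
    rw [PySem.List.pyRange_one_cons (by simp; omega)]
    rw [pvDropCons lst k hk1]
    simp only [List.filter_cons]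
    have hg1 : PySem.List.pyGetD lst ((k : Int) + 1) 0 = lst.getD (k + 1) 0 := by
      rw [pvCast1, PySem.List.pyGetD_natCast]
    have hz : (((k : Int) + 1) == 0) = false := by rw [beq_eq_false_iff_ne]; omega
    by_cases hc : lst.getD (k + 1) 0 = lst.getD k 0 + 1
    · rw [if_neg (by rw [hg1, pvGetD_cast, hz]; simpa using hc)]
      rw [show ((k : Int) + 1 + 1) = ((k + 1 : Nat) : Int) + 1 by push_cast; ring]
      rw [ih (k + 1) s (by omega)]
      rw [pvRun_cons_pos _ _ _ _ hc]
    · rw [if_pos (by rw [hg1, pvGetD_cast, hz]; simpa using hc)]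
      have hstep : pvChain (fun st => (PySem.List.pyGetD lst st.1 0, PySem.List.pyGetD lst (st.2 - 1) 0))
          (PySem.List.len lst)
          ((s : Int) :: ((k : Int) + 1) :: (PySem.List.pyRange ((k : Int) + 1 + 1) (PySem.List.len lst) 1).filter
            (fun i => i == 0 || !(PySem.List.pyGetD lst i 0 == PySem.List.pyGetD lst (i-1) 0 + 1)))
          = (PySem.List.pyGetD lst (s : Int) 0, PySem.List.pyGetD lst ((k : Int) + 1 - 1) 0) ::
            pvChain (fun st => (PySem.List.pyGetD lst st.1 0, PySem.List.pyGetD lst (st.2 - 1) 0))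
              (PySem.List.len lst)
              (((k : Int) + 1) :: (PySem.List.pyRange ((k : Int) + 1 + 1) (PySem.List.len lst) 1).filter
                (fun i => i == 0 || !(PySem.List.pyGetD lst i 0 == PySem.List.pyGetD lst (i-1) 0 + 1))) := rfl
      rw [hstep, PySem.List.pyGetD_natCast, pvGetD_cast]
      rw [show ((k : Int) + 1) = ((k + 1 : Nat) : Int) from pvCast1 k]
      rw [ih (k + 1) (k + 1) (by omega)]
      rw [pvRun_cons_neg _ _ _ _ hc]

-- ===== VERDICT (by name: the statement is the Claim_ definition above) =====
theorem create_intervals_2_spec : Claim_equal_create_intervals_2 := by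
  intro data _
  unfold Spec_create_intervals_2
  by_cases hd : data = []
  · subst hd; rfl
  · have hlp : 0 < data.length := List.length_pos_of_ne_nil hd
    have hll : (PySem.List.sorted data id false).length = data.length := by
      exact PySem.List.length_sorted data id false
    set lst := PySem.List.sorted data id false with hlst
    obtain ⟨m, hm⟩ : ∃ m, m + (0 + 1) = lst.length := ⟨lst.length - 1, by omega⟩
    have hA := pvAfold lst m 0 (PySem.List.pyGetD lst 0 0) (PySem.List.pyGetD lst 0 0) [] hm
      (by rw [PySem.List.pyGetD_zero])
    have hB := pvBfold lst m 0 0 hm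
    simp only [Nat.cast_zero, zero_add] at hA hB
    have hAside : create_intervals_2 data =
        pvRun (lst.getD 0 0) (lst.getD 0 0) (lst.drop 1) := by
      unfold create_intervals_2
      rw [if_neg (by simp [hd])]
      rw [← hlst]
      calc (let st := (PySem.List.pyRange 1 (PySem.List.len lst) 1).foldl
              (fun (st : List (Int × Int) × Int × Int) i =>
                if PySem.List.pyGetD lst i 0 == PySem.List.pyGetD lst (i-1) 0 + 1 then
                  (st.1, st.2.1, PySem.List.pyGetD lst i 0)
                else
                  (st.1 ++ [(st.2.1, st.2.2)], PySem.List.pyGetD lst i 0, PySem.List.pyGetD lst i 0))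
              ([], PySem.List.pyGetD lst 0 0, PySem.List.pyGetD lst 0 0)
            st.1 ++ [(st.2.1, st.2.2)])
          = [] ++ pvRun (PySem.List.pyGetD lst 0 0) (PySem.List.pyGetD lst 0 0) (lst.drop 1) := hA
        _ = pvRun (lst.getD 0 0) (lst.getD 0 0) (lst.drop 1) := by
            rw [List.nil_append, PySem.List.pyGetD_zero]
    have hBside : create_intervals_2_alt data =
        pvRun (lst.getD 0 0) (lst.getD 0 0) (lst.drop 1) := by
      unfold create_intervals_2_alt
      rw [← hlst]
      show (((PySem.List.pyRange 0 (PySem.List.len lst) 1).filter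
              (fun i => i == 0 || !(PySem.List.pyGetD lst i 0 == PySem.List.pyGetD lst (i-1) 0 + 1))).zip
            (((PySem.List.pyRange 0 (PySem.List.len lst) 1).filter
              (fun i => i == 0 || !(PySem.List.pyGetD lst i 0 == PySem.List.pyGetD lst (i-1) 0 + 1))).drop 1
              ++ [PySem.List.len lst])).map
          (fun st => (PySem.List.pyGetD lst st.1 0, PySem.List.pyGetD lst (st.2 - 1) 0))
        = pvRun (lst.getD 0 0) (lst.getD 0 0) (lst.drop 1)
      rw [pvChain_zip]
      rw [PySem.List.pyRange_one_cons (by simp; omega)]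
      rw [List.filter_cons, if_pos (by simp)]
      rw [show (0 : Int) + 1 = 1 by norm_num]
      exact hB
    rw [hAside, hBside]
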